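-- pv_equiv track=rewrite | github.com/BCAS-Team/CrossFire-Cosmic-v6.0f8 | main.py | _parse_kv
-- ===== SOURCE A (Python) =====
-- from typing import List, Optional, Dict, Any
--
-- def _parse_kv(args: List[str]) -> Dict[str, str]:
--     """Parse simple --key value pairs from token list."""
--     out: Dict[str, str] = {}
--     i = 0
--     while i < len(args):
--         tok = args[i]
--         if tok.startswith("--") and i + 1 < len(args):
--             out[tok[2:]] = args[i + 1]
--             i += 2
--         else:
--             i += 1
--     return out
-- ===== SOURCE B (Python) =====
-- from typing import List, Dict
--
-- def _parse_kv(args: List[str]) -> Dict[str, str]: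
--     """Parse simple --key value pairs from token list (state-machine pass)."""
--     out: Dict[str, str] = {}
--     pending = None
--     for tok in args:
--         if pending is not None:
--             out[pending] = tok
--             pending = None
--         elif tok.startswith("--"):
--             pending = tok[2:]
--     return out
-- ===== Notes on version B (the rewrite author's own statement) =====
-- stated objective: idiomatic
-- what changed: Replaced the while-loop with manual index arithmetic and i+1 lookahead by a single for-loop state machine carrying a 'pending' key variable.
import Mathlib
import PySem

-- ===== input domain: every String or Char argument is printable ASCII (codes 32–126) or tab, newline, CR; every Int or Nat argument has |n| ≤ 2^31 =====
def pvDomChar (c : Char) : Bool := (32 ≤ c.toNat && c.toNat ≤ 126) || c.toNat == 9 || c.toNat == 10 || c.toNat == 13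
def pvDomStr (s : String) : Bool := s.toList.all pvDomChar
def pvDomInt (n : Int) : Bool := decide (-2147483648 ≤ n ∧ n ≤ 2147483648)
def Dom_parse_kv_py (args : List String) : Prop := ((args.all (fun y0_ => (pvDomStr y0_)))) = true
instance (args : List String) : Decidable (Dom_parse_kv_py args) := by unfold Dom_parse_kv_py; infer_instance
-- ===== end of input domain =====

-- B replaces A's index-arithmetic while-loop (i += 2 / i += 1 with lookahead) by a single
-- for-loop state machine carrying a 'pending' key; same results, idiomatic decomposition.

-- ===== PORT A =====
-- A's while-loop: index i, two-token step when a '--' flag with a following value is seen.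
def parseKvLoopA (args : List String) (out : PySem.Dict String String) (i : Nat) :
    PySem.Dict String String :=
  if h : i < args.length then
    let tok := args[i]
    if h2 : PySem.Str.startswith tok "--" = true ∧ i + 1 < args.length then
      parseKvLoopA args (out.insert (PySem.Str.slice tok (some 2) none) (args[i + 1]'h2.2)) (i + 2)
    else
      parseKvLoopA args out (i + 1)
  else out
termination_by args.length - i

def parse_kv_py (args : List String) : List (String × String) :=
  (parseKvLoopA args PySem.Dict.empty 0).items

-- ===== PORT B =====
-- B's for-loop with a 'pending' key state.
def parseKvLoopB : List String → Option String → PySem.Dict String String →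
    PySem.Dict String String
  | [], _, out => out
  | tok :: rest, some k, out => parseKvLoopB rest none (out.insert k tok)
  | tok :: rest, none, out =>
    if PySem.Str.startswith tok "--" then
      parseKvLoopB rest (some (PySem.Str.slice tok (some 2) none)) out
    else
      parseKvLoopB rest none out

def parse_kv_py_alt (args : List String) : List (String × String) :=
  (parseKvLoopB args none PySem.Dict.empty).items

-- ===== PRECONDITION & SPEC =====
def Spec_parse_kv_py (args : List String) (out : List (String × String)) : Prop := out = parse_kv_py_alt args
instance (args : List String) (out : List (String × String)) : Decidable (Spec_parse_kv_py args out) := by unfold Spec_parse_kv_py; infer_instance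

-- ===== CLAIM (what is proved, stated in full; the proofs are below) =====
def Claim_equal_parse_kv_py : Prop := ∀ (args : List String), Dom_parse_kv_py args → Spec_parse_kv_py args (parse_kv_py args)

-- ===== LEMMAS AND PROOFS =====

lemma loopA_eq_loopB (args : List String) :
    ∀ (n i : Nat) (out : PySem.Dict String String), args.length - i ≤ n →
      parseKvLoopA args out i = parseKvLoopB (args.drop i) none out := by
  intro n
  induction n with
  | zero =>
    intro i out hn
    have hge : args.length ≤ i := by omega
    rw [parseKvLoopA, dif_neg (by omega), List.drop_eq_nil_of_le hge, parseKvLoopB]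
  | succ n ih =>
    intro i out hn
    by_cases h : i < args.length
    · have hdrop : args.drop i = args[i] :: args.drop (i + 1) :=
        List.drop_eq_getElem_cons h
      rw [parseKvLoopA, dif_pos h, hdrop]
      by_cases hs : PySem.Str.startswith args[i] "--" = true
      · by_cases hv : i + 1 < args.length
        · have hdrop2 : args.drop (i + 1) = args[i + 1] :: args.drop (i + 2) :=
            List.drop_eq_getElem_cons hv
          rw [dif_pos ⟨hs, hv⟩, parseKvLoopB, if_pos hs, hdrop2, parseKvLoopB]
          exact ih (i + 2) _ (by omega)
        · have hend : args.drop (i + 1) = [] := List.drop_eq_nil_of_le (by omega)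
          rw [dif_neg (by tauto), parseKvLoopB, if_pos hs, hend, parseKvLoopB,
            parseKvLoopA, dif_neg (by omega)]
      · rw [dif_neg (by tauto), parseKvLoopB, if_neg hs]
        exact ih (i + 1) _ (by omega)
    · have hge : args.length ≤ i := by omega
      rw [parseKvLoopA, dif_neg h, List.drop_eq_nil_of_le hge, parseKvLoopB]

-- ===== VERDICT (by name: the statement is the Claim_ definition above) =====
theorem parse_kv_py_spec : Claim_equal_parse_kv_py := by
  intro args _
  unfold Spec_parse_kv_py parse_kv_py parse_kv_py_alt
  rw [loopA_eq_loopB args args.length 0 _ (by omega), List.drop_zero]
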